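-- pv_equiv track=rewrite | github.com/JavaLangMarlon/aoc-2024 | day15/main.py | get_new_box_locations
-- ===== SOURCE A (Python) =====
-- VOID = 0
--
-- OBSTACLE = 1
--
-- RIGHT_BOX = 3
--
-- def get_new_box_locations(board: list[list[int]], instruction: str,
--                           i: int, js: set[int]) -> tuple[set[tuple[int, int]], set[tuple[int, int]], set[tuple[int, int]]] | None:
--     new_voids = set()
--     left_box_locations = set()
--     right_box_locations = set()
--     while len(js) != 0:
--         new_js = set()
--         new_i = i + 1 if instruction == "v" else i - 1
--
--         for j in js:
--             if board[i][j] == VOID: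
--                 continue
--             if board[i][j] == OBSTACLE:
--                 return None
--             if board[i][j] == RIGHT_BOX:
--                 new_voids.add((i, j))
--                 new_voids.add((i, j - 1))
--                 left_box_locations.add((new_i, j - 1))
--                 right_box_locations.add((new_i, j))
--                 new_js.add(j - 1)
--                 new_js.add(j)
--             else:
--                 new_voids.add((i, j))
--                 new_voids.add((i, j + 1))
--                 left_box_locations.add((new_i, j))
--                 right_box_locations.add((new_i, j + 1))
--                 new_js.add(j + 1)
--                 new_js.add(j)
--         i = new_i
--         js = new_js
--     return new_voids, left_box_locations, right_box_locations
-- ===== SOURCE B (Python) =====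
-- VOID = 0
--
-- OBSTACLE = 1
--
-- RIGHT_BOX = 3
--
--
-- def get_new_box_locations(board: list[list[int]], instruction: str,
--                           i: int, js: set[int]) -> tuple[set[tuple[int, int]], set[tuple[int, int]], set[tuple[int, int]]] | None:
--     # Single worklist BFS over individual cells instead of a row-by-row frontier.
--     di = 1 if instruction == "v" else -1
--     new_voids = set()
--     left_box_locations = set()
--     right_box_locations = set()
--     queue = [(i, j) for j in js]
--     seen = set(queue)
--     k = 0
--     while k < len(queue):
--         r, c = queue[k]
--         k += 1
--         cell = board[r][c]
--         if cell == VOID: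
--             continue
--         if cell == OBSTACLE:
--             return None
--         if cell == RIGHT_BOX:
--             partner, lc = c - 1, c - 1
--         else:
--             partner, lc = c + 1, c
--         new_voids.add((r, c))
--         new_voids.add((r, partner))
--         left_box_locations.add((r + di, lc))
--         right_box_locations.add((r + di, lc + 1))
--         for child in ((r + di, partner), (r + di, c)):
--             if child not in seen:
--                 seen.add(child)
--                 queue.append(child)
--     return new_voids, left_box_locations, right_box_locations
-- ===== Notes on version B (the rewrite author's own statement) =====
-- stated objective: alternative
-- what changed: Replaces A's round-by-round frontier (a fresh set of columns per row, rebuilt each while-iteration) by one flat FIFO worklist of individual (row, col) cells with a visited set, processed by a single loop with an index cursor.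
import Mathlib
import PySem

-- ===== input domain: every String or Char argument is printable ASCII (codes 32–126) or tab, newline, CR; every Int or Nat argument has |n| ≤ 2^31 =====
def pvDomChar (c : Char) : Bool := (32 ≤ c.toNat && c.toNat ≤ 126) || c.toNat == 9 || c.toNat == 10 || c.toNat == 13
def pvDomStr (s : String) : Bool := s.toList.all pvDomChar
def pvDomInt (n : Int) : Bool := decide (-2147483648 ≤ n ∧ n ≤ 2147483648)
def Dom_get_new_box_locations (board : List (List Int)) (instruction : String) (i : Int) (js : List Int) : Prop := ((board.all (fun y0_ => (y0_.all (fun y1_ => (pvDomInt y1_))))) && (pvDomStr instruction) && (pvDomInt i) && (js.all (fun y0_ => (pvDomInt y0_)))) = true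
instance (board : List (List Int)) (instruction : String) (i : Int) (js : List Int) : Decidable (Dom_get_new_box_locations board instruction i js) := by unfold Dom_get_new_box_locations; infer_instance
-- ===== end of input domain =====

-- ===== PORT A =====
-- B changes the traversal data structure: A advances a whole row-frontier set per step,
-- B runs one FIFO worklist of individual cells with a visited set (objective: alternative; not faster).
-- Both ports are about the RETURN value only; 'board[i][j]' out of range (Python IndexError) is
-- mapped to 0 by pvCell — Pre_ excludes every input on which the Python indexing can raise.
def pvCell (board : List (List Int)) (r c : Int) : Int :=
  match PySem.List.pyGet? board r with
  | none => 0
  | some row => (PySem.List.pyGet? row c).getD 0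

abbrev PvS := PySem.Set (Int × Int) × PySem.Set (Int × Int) × PySem.Set (Int × Int)

-- the 'for j in js' body of A (early 'return None' = none); njs accumulates new_js
def pvRowA (board : List (List Int)) (i ni : Int) :
    List Int → PvS → PySem.Set Int → Option (PvS × PySem.Set Int)
  | [], s, njs => some (s, njs)
  | j :: rest, s, njs =>
    if pvCell board i j = 0 then pvRowA board i ni rest s njs
    else if pvCell board i j = 1 then none
    else if pvCell board i j = 3 then
      pvRowA board i ni rest
        (PySem.Set.add (PySem.Set.add s.1 (i, j)) (i, j - 1),
         PySem.Set.add s.2.1 (ni, j - 1), PySem.Set.add s.2.2 (ni, j))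
        (PySem.Set.add (PySem.Set.add njs (j - 1)) j)
    else
      pvRowA board i ni rest
        (PySem.Set.add (PySem.Set.add s.1 (i, j)) (i, j + 1),
         PySem.Set.add s.2.1 (ni, j), PySem.Set.add s.2.2 (ni, j + 1))
        (PySem.Set.add (PySem.Set.add njs (j + 1)) j)

-- A's 'while len(js) != 0' loop; fuel is a guard only (pvLoopA_total: it never runs out)
def pvLoopA (board : List (List Int)) (instruction : String) :
    Nat → Int → PySem.Set Int → PvS → Option (Option PvS)
  | 0, _, _, _ => none
  | fuel + 1, i, js, s =>
    if js.isEmpty then some (some s)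
    else
      match pvRowA board i (if instruction = "v" then i + 1 else i - 1) js s PySem.Set.empty with
      | none => some none
      | some (s', njs) =>
        pvLoopA board instruction fuel (if instruction = "v" then i + 1 else i - 1) njs s'

def get_new_box_locations (board : List (List Int)) (instruction : String) (i : Int) (js : List Int) : Option ((List (Int × Int)) × (List (Int × Int)) × (List (Int × Int))) :=
  match pvLoopA board instruction (2 * board.length + 3) i (PySem.Set.ofList js)
      (PySem.Set.empty, PySem.Set.empty, PySem.Set.empty) with
  | some (some s) => some s
  | _ => none

-- ===== PORT B =====
def pvDi (instruction : String) : Int := if instruction = "v" then 1 else -1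

-- B's 'while k < len(queue)' worklist loop; fuel is a guard only (never runs out on admitted inputs)
def pvLoopB (board : List (List Int)) (di : Int) :
    Nat → List (Int × Int) → PySem.Set (Int × Int) → PvS → Option (Option PvS)
  | 0, _, _, _ => none
  | fuel + 1, queue, seen, s =>
    match queue with
    | [] => some (some s)
    | (r, c) :: rest =>
      let v := pvCell board r c
      if v = 0 then pvLoopB board di fuel rest seen s
      else if v = 1 then some none
      else
        let partner := if v = 3 then c - 1 else c + 1
        let lc := if v = 3 then c - 1 else c
        let s' : PvS :=
          (PySem.Set.add (PySem.Set.add s.1 (r, c)) (r, partner),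
           PySem.Set.add s.2.1 (r + di, lc), PySem.Set.add s.2.2 (r + di, lc + 1))
        let q1 := if PySem.Set.contains seen (r + di, partner) then rest else rest ++ [(r + di, partner)]
        let seen1 := PySem.Set.add seen (r + di, partner)
        let q2 := if PySem.Set.contains seen1 (r + di, c) then q1 else q1 ++ [(r + di, c)]
        let seen2 := PySem.Set.add seen1 (r + di, c)
        pvLoopB board di fuel q2 seen2 s'

def get_new_box_locations_alt (board : List (List Int)) (instruction : String) (i : Int) (js : List Int) : Option ((List (Int × Int)) × (List (Int × Int)) × (List (Int × Int))) :=
  let queue := js.map (fun j => (i, j))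
  match pvLoopB board (pvDi instruction) ((js.length + 1) * 3 ^ (2 * board.length + 3)) queue
      (PySem.Set.ofList queue) (PySem.Set.empty, PySem.Set.empty, PySem.Set.empty) with
  | some (some s) => some s
  | some none => none
  | none => none

-- ===== PRECONDITION & SPEC =====
-- Pre_ excludes inputs on which the push propagation can read outside the board: there the Python
-- raises IndexError, or — when an obstacle and an out-of-range cell are reachable in the same run —
-- returns None or raises depending on set-iteration/traversal order, so no single value can be
-- claimed.  It admits: empty js; any push that resolves inside its starting row (all js-cells VOID,
-- or an OBSTACLE among them); and any rectangular board whose edge cells cannot push past the edge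
-- (no RIGHT_BOX heads a row, each row's last cell is VOID/OBSTACLE/RIGHT_BOX, and the row at the far
-- end of the push direction is all VOID/OBSTACLE) with i and js in (possibly negative) index range —
-- there every read is in range and the returned value is order-independent.  This also excludes some
-- inputs on which A happens to return (pushes that use negative-index wraparound but die before
-- leaving the board); on those B returns the same value — see the cite in the claim.
def pvRowSafe (board : List (List Int)) (i : Int) (js : List Int) : Prop :=
  -(board.length : Int) ≤ i ∧ i < board.length ∧
  (∀ j ∈ js, -(((PySem.List.pyGet? board i).getD []).length : Int) ≤ j ∧
      j < ((PySem.List.pyGet? board i).getD []).length) ∧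
  ((∀ j ∈ js, (PySem.List.pyGet? ((PySem.List.pyGet? board i).getD []) j).getD 0 = 0) ∨
   (∃ j ∈ js, (PySem.List.pyGet? ((PySem.List.pyGet? board i).getD []) j).getD 0 = 1))

def pvGridSafe (board : List (List Int)) (instruction : String) (i : Int) (js : List Int) : Prop :=
  board ≠ [] ∧
  (∀ row ∈ board, row.length = board.headI.length) ∧
  (∀ row ∈ board, row.headI ≠ 3 ∧ (row.getLastI = 0 ∨ row.getLastI = 1 ∨ row.getLastI = 3)) ∧
  (instruction = "v" → ∀ x ∈ board.getLastI, x = 0 ∨ x = 1) ∧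
  (instruction ≠ "v" → ∀ x ∈ board.headI, x = 0 ∨ x = 1) ∧
  -(board.length : Int) ≤ i ∧ i < board.length ∧
  (∀ j ∈ js, -(board.headI.length : Int) ≤ j ∧ j < (board.headI.length : Int))

def Pre_get_new_box_locations (board : List (List Int)) (instruction : String) (i : Int) (js : List Int) : Prop :=
  js.Nodup ∧ (js = [] ∨ pvRowSafe board i js ∨ pvGridSafe board instruction i js)

instance (board : List (List Int)) (instruction : String) (i : Int) (js : List Int) : Decidable (Pre_get_new_box_locations board instruction i js) := by
  unfold Pre_get_new_box_locations pvRowSafe pvGridSafe; infer_instance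

def pvWitness_get_new_box_locations : List (List Int) × String × Int × List Int :=
  ([[1, 1, 1, 1], [1, 3, 0, 1], [1, 0, 0, 1], [1, 1, 1, 1]], "v", 1, [1])

def Spec_get_new_box_locations (board : List (List Int)) (instruction : String) (i : Int) (js : List Int) (out : Option ((List (Int × Int)) × (List (Int × Int)) × (List (Int × Int)))) : Prop := out = get_new_box_locations_alt board instruction i js
instance (board : List (List Int)) (instruction : String) (i : Int) (js : List Int) (out : Option ((List (Int × Int)) × (List (Int × Int)) × (List (Int × Int)))) : Decidable (Spec_get_new_box_locations board instruction i js out) := by unfold Spec_get_new_box_locations; infer_instance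

-- ===== CLAIM (what is proved, stated in full; the proofs are below) =====
def Claim_equal_get_new_box_locations : Prop := ∀ (board : List (List Int)) (instruction : String) (i : Int) (js : List Int), Dom_get_new_box_locations board instruction i js → Pre_get_new_box_locations board instruction i js → Spec_get_new_box_locations board instruction i js (get_new_box_locations board instruction i js)

-- ===== LEMMAS AND PROOFS =====
-- (the equivalence is in fact proved from js.Nodup alone; the rest of Pre_ only
-- keeps the Python free of IndexError / set-iteration-order effects)

theorem pvCell_out (board : List (List Int)) (r c : Int)
    (h : ¬ (-(board.length : Int) ≤ r ∧ r < board.length)) : pvCell board r c = 0 := by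
  unfold pvCell
  have : PySem.List.pyGet? board r = none := by
    rw [PySem.List.pyGet?_eq_none_iff]
    intro hin
    exact h ⟨hin.1, hin.2⟩
  rw [this]

-- every element a row step adds to new_js comes with a non-VOID cell in row i
theorem pvRowA_nonvoid (board : List (List Int)) (i ni : Int) :
    ∀ (L : List Int) (s : PvS) (njs : PySem.Set Int) (s' : PvS) (njs' : PySem.Set Int),
      pvRowA board i ni L s njs = some (s', njs') → njs' ≠ [] →
      njs ≠ [] ∨ ∃ j, pvCell board i j ≠ 0 := by
  intro L
  induction L with
  | nil =>
    intro s njs s' njs' h hne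
    simp only [pvRowA] at h
    cases h
    exact Or.inl hne
  | cons j rest ih =>
    intro s njs s' njs' h hne
    simp only [pvRowA] at h
    by_cases h0 : pvCell board i j = 0
    · rw [if_pos h0] at h
      exact ih _ _ _ _ h hne
    · exact Or.inr ⟨j, h0⟩

theorem pvRowA_len (board : List (List Int)) (i ni : Int) :
    ∀ (L : List Int) (s : PvS) (njs : PySem.Set Int) (s' : PvS) (njs' : PySem.Set Int),
      pvRowA board i ni L s njs = some (s', njs') →
      njs'.length ≤ njs.length + 2 * L.length := by
  intro L
  induction L with
  | nil =>
    intro s njs s' njs' h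
    simp only [pvRowA] at h
    cases h
    simp
  | cons j rest ih =>
    intro s njs s' njs' h
    simp only [pvRowA] at h
    have hadd : ∀ (t : PySem.Set Int) (x : Int), (PySem.Set.add t x).length ≤ t.length + 1 := by
      intro t x
      rw [PySem.Set.add_eq_ite]
      split <;> simp
    split_ifs at h
    · have := ih _ _ _ _ h
      simp only [List.length_cons] at *
      omega
    · have := ih _ _ _ _ h
      have h1 := hadd njs (j - 1)
      have h2 := hadd (PySem.Set.add njs (j - 1)) j
      simp only [List.length_cons] at *
      omega
    · have := ih _ _ _ _ h
      have h1 := hadd njs (j + 1)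
      have h2 := hadd (PySem.Set.add njs (j + 1)) j
      simp only [List.length_cons] at *
      omega

theorem pvLoopA_nil (board : List (List Int)) (instruction : String) (f : Nat) (i : Int) (s : PvS)
    (hf : 1 ≤ f) : pvLoopA board instruction f i ([] : PySem.Set Int) s = some (some s) := by
  cases f with
  | zero => omega
  | succ f => simp [pvLoopA]

theorem pvLoopA_aux (board : List (List Int)) (instruction : String) :
    ∀ (fuel : Nat) (i : Int) (js : PySem.Set Int) (s : PvS),
      ((-(board.length : Int) ≤ i ∧ i < board.length) →
        (if instruction = "v" then (board.length - i).toNat else (i + board.length).toNat) + 3 ≤ fuel) →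
      (¬ (-(board.length : Int) ≤ i ∧ i < board.length) → 2 ≤ fuel) →
      pvLoopA board instruction fuel i js s ≠ none := by
  intro fuel
  induction fuel with
  | zero =>
    intro i js s h1 h2
    by_cases hr : (-(board.length : Int) ≤ i ∧ i < board.length)
    · have := h1 hr; omega
    · have := h2 hr; omega
  | succ f ih =>
    intro i js s h1 h2
    simp only [pvLoopA]
    by_cases hje : js.isEmpty
    · simp [hje]
    · simp only [hje, Bool.false_eq_true, if_false]
      rcases hrow : pvRowA board i (if instruction = "v" then i + 1 else i - 1) js s
          PySem.Set.empty with _ | ⟨s', njs'⟩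
      · simp
      · simp only []
        by_cases hn : njs' = ([] : List Int)
        · subst hn
          have hf1 : 1 ≤ f := by
            by_cases hr : (-(board.length : Int) ≤ i ∧ i < board.length)
            · have := h1 hr; omega
            · have := h2 hr; omega
          rw [pvLoopA_nil board instruction f _ s' hf1]
          simp
        · have hnv := pvRowA_nonvoid board i _ js s PySem.Set.empty s' njs' hrow hn
          rcases hnv with hc | ⟨j, hj⟩
          · exact absurd rfl hc
          · have hir : (-(board.length : Int) ≤ i ∧ i < board.length) := by
              by_contra hco
              exact hj (pvCell_out board i j hco)
            have hm := h1 hir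
            apply ih
            · intro hr2
              by_cases hv : instruction = "v"
              · simp only [if_pos hv] at hm hr2 ⊢; omega
              · simp only [if_neg hv] at hm hr2 ⊢; omega
            · intro _
              omega

-- A's loop never exhausts its fuel
theorem pvLoopA_total (board : List (List Int)) (instruction : String) :
    ∀ (fuel : Nat) (i : Int) (js : PySem.Set Int) (s : PvS),
      2 * board.length + 3 ≤ fuel →
      pvLoopA board instruction fuel i js s ≠ none := by
  intro fuel i js s hf
  apply pvLoopA_aux
  · intro hr
    split_ifs with hv <;> omega
  · intro _; omega

-- one row of A = the corresponding segment of B's worklist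
theorem pvAddMap (njs : PySem.Set Int) (x : Int) (g : Int → Int × Int) :
    (PySem.Set.add njs x).map g = njs.map g ++ (if x ∈ njs then [] else [g x]) := by
  rw [PySem.Set.add_eq_ite]; split <;> simp

theorem pvRowSim (board : List (List Int)) (di i : Int) :
    ∀ (L : List Int) (s : PvS) (njs : PySem.Set Int) (seen : PySem.Set (Int × Int)),
      (∀ c : Int, (i + di, c) ∈ seen ↔ c ∈ njs) →
      (pvRowA board i (i + di) L s njs = none →
        ∀ f : Nat, L.length < f →
          pvLoopB board di f (L.map (fun j => (i, j)) ++ njs.map (fun j => (i + di, j))) seen s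
            = some none) ∧
      (∀ (s' : PvS) (njs' : PySem.Set Int), pvRowA board i (i + di) L s njs = some (s', njs') →
        ∃ seen' : PySem.Set (Int × Int),
          (∀ c : Int, (i + di, c) ∈ seen' ↔ c ∈ njs') ∧
          (∀ p ∈ seen', p ∈ seen ∨ p.1 = i + di) ∧
          ∀ f : Nat,
            pvLoopB board di (f + L.length) (L.map (fun j => (i, j)) ++ njs.map (fun j => (i + di, j))) seen s
              = pvLoopB board di f (njs'.map (fun j => (i + di, j))) seen' s') := by
  intro L
  induction L with
  | nil =>
    intro s njs seen hsl
    constructor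
    · intro hA
      simp [pvRowA] at hA
    · intro s' njs' hA
      simp only [pvRowA, Option.some.injEq, Prod.mk.injEq] at hA
      obtain ⟨hs, hn⟩ := hA
      subst hs; subst hn
      exact ⟨seen, hsl, fun p hp => Or.inl hp, fun f => by simp⟩
  | cons j rest ih =>
    intro s njs seen hsl
    by_cases h0 : pvCell board i j = 0
    · -- VOID: both sides skip the cell
      have hstep : ∀ (f : Nat),
          pvLoopB board di (f + 1) (((j :: rest).map (fun j => (i, j))) ++ njs.map (fun j => (i + di, j))) seen s
            = pvLoopB board di f (rest.map (fun j => (i, j)) ++ njs.map (fun j => (i + di, j))) seen s := by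
        intro f
        simp only [List.map_cons, List.cons_append, pvLoopB]
        rw [if_pos h0]
      constructor
      · intro hA f hf
        simp only [pvRowA, if_pos h0] at hA
        cases f with
        | zero => omega
        | succ f =>
          rw [hstep f]
          exact (ih s njs seen hsl).1 hA f (by simp at hf; omega)
      · intro s' njs' hA
        simp only [pvRowA, if_pos h0] at hA
        obtain ⟨seen', hp1, hp2, heq⟩ := (ih s njs seen hsl).2 s' njs' hA
        refine ⟨seen', hp1, hp2, fun f => ?_⟩
        have e : f + (j :: rest).length = (f + rest.length) + 1 := by simp; omega
        rw [e, hstep (f + rest.length)]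
        exact heq f
    · by_cases h1 : pvCell board i j = 1
      · -- OBSTACLE: both return None
        constructor
        · intro _ f hf
          cases f with
          | zero => omega
          | succ f =>
            simp only [List.map_cons, List.cons_append, pvLoopB]
            rw [if_neg h0, if_pos h1]
        · intro s' njs' hA
          simp only [pvRowA, if_neg h0, if_pos h1] at hA
          exact absurd hA (by simp)
      · -- a box cell: both record the box and enqueue/insert the two children
        rcases em (pvCell board i j = 3) with h3 | h3
        ·
                -- RIGHT_BOX half: partner/left column j-1
                have hA1 : pvRowA board i (i + di) (j :: rest) s njs = pvRowA board i (i + di) rest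
                    (PySem.Set.add (PySem.Set.add s.1 (i, j)) (i, (j - 1)),
                     PySem.Set.add s.2.1 (i + di, (j - 1)), PySem.Set.add s.2.2 (i + di, j)) (PySem.Set.add (PySem.Set.add njs (j - 1)) j) := by
                  simp only [pvRowA, if_neg h0, if_neg h1, if_pos h3]
                have hsl2 : ∀ c : Int, (i + di, c) ∈ PySem.Set.add (PySem.Set.add seen (i + di, (j - 1))) (i + di, j) ↔ c ∈ PySem.Set.add (PySem.Set.add njs (j - 1)) j := by
                  intro c
                  simp only [PySem.Set.mem_add, hsl c, Prod.mk.injEq, true_and]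
                have hstep : ∀ f : Nat, pvLoopB board di (f + 1) (((j :: rest).map (fun j => (i, j))) ++ njs.map (fun j => (i + di, j))) seen s
                    = pvLoopB board di f (rest.map (fun j => (i, j)) ++ (PySem.Set.add (PySem.Set.add njs (j - 1)) j).map (fun j => (i + di, j)))
                        (PySem.Set.add (PySem.Set.add seen (i + di, (j - 1))) (i + di, j))
                        (PySem.Set.add (PySem.Set.add s.1 (i, j)) (i, (j - 1)),
                         PySem.Set.add s.2.1 (i + di, (j - 1)), PySem.Set.add s.2.2 (i + di, j)) := by
                  intro f
                  simp only [List.map_cons, List.cons_append, pvLoopB]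
                  rw [if_neg h0, if_neg h1]
                  simp only [if_pos h3]
                  rw [show j - 1 + 1 = j by ring]
                  have hne : ¬ (j = j - 1) := by omega
                  clear hA1 hsl2 ih
                  simp only [pvAddMap, PySem.Set.mem_add, hsl, hne, or_false, Prod.mk.injEq,
                    true_and, PySem.Set.contains_eq_listContains, List.contains_eq_mem,
                    decide_eq_true_eq]
                  split_ifs <;> simp_all [List.append_assoc]
                constructor
                · intro hA f hf
                  rw [hA1] at hA
                  cases f with
                  | zero => omega
                  | succ f =>
                    rw [hstep f]
                    exact (ih _ _ _ hsl2).1 hA f (by simp at hf; omega)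
                · intro s' njs' hA
                  rw [hA1] at hA
                  obtain ⟨seen', hp1, hp2, heq⟩ := (ih _ _ _ hsl2).2 s' njs' hA
                  refine ⟨seen', hp1, fun p hp => ?_, fun f => ?_⟩
                  · rcases hp2 p hp with h | h
                    · simp only [PySem.Set.mem_add] at h
                      rcases h with (h | h) | h
                      · exact Or.inl h
                      · subst h; exact Or.inr rfl
                      · subst h; exact Or.inr rfl
                    · exact Or.inr h
                  · have e : f + (j :: rest).length = (f + rest.length) + 1 := by
                      simp only [List.length_cons]; omega
                    rw [e, hstep (f + rest.length)]
                    exact heq f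
        ·
                -- LEFT_BOX half: partner column j+1, left column j
                have hA1 : pvRowA board i (i + di) (j :: rest) s njs = pvRowA board i (i + di) rest
                    (PySem.Set.add (PySem.Set.add s.1 (i, j)) (i, (j + 1)),
                     PySem.Set.add s.2.1 (i + di, j), PySem.Set.add s.2.2 (i + di, (j + 1))) (PySem.Set.add (PySem.Set.add njs (j + 1)) j) := by
                  simp only [pvRowA, if_neg h0, if_neg h1, if_neg h3]
                have hsl2 : ∀ c : Int, (i + di, c) ∈ PySem.Set.add (PySem.Set.add seen (i + di, (j + 1))) (i + di, j) ↔ c ∈ PySem.Set.add (PySem.Set.add njs (j + 1)) j := by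
                  intro c
                  simp only [PySem.Set.mem_add, hsl c, Prod.mk.injEq, true_and]
                have hstep : ∀ f : Nat, pvLoopB board di (f + 1) (((j :: rest).map (fun j => (i, j))) ++ njs.map (fun j => (i + di, j))) seen s
                    = pvLoopB board di f (rest.map (fun j => (i, j)) ++ (PySem.Set.add (PySem.Set.add njs (j + 1)) j).map (fun j => (i + di, j)))
                        (PySem.Set.add (PySem.Set.add seen (i + di, (j + 1))) (i + di, j))
                        (PySem.Set.add (PySem.Set.add s.1 (i, j)) (i, (j + 1)),
                         PySem.Set.add s.2.1 (i + di, j), PySem.Set.add s.2.2 (i + di, (j + 1))) := by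
                  intro f
                  simp only [List.map_cons, List.cons_append, pvLoopB]
                  rw [if_neg h0, if_neg h1]
                  simp only [if_neg h3]
                  have hne : ¬ (j = j + 1) := by omega
                  clear hA1 hsl2 ih
                  simp only [pvAddMap, PySem.Set.mem_add, hsl, hne, or_false, Prod.mk.injEq,
                    true_and, PySem.Set.contains_eq_listContains, List.contains_eq_mem,
                    decide_eq_true_eq]
                  split_ifs <;> simp_all [List.append_assoc]
                constructor
                · intro hA f hf
                  rw [hA1] at hA
                  cases f with
                  | zero => omega
                  | succ f =>
                    rw [hstep f]
                    exact (ih _ _ _ hsl2).1 hA f (by simp at hf; omega)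
                · intro s' njs' hA
                  rw [hA1] at hA
                  obtain ⟨seen', hp1, hp2, heq⟩ := (ih _ _ _ hsl2).2 s' njs' hA
                  refine ⟨seen', hp1, fun p hp => ?_, fun f => ?_⟩
                  · rcases hp2 p hp with h | h
                    · simp only [PySem.Set.mem_add] at h
                      rcases h with (h | h) | h
                      · exact Or.inl h
                      · subst h; exact Or.inr rfl
                      · subst h; exact Or.inr rfl
                    · exact Or.inr h
                  · have e : f + (j :: rest).length = (f + rest.length) + 1 := by
                      simp only [List.length_cons]; omega
                    rw [e, hstep (f + rest.length)]
                    exact heq f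

theorem pvDi_sq (instruction : String) : pvDi instruction * pvDi instruction = 1 := by
  unfold pvDi; split <;> norm_num

theorem pvNi (instruction : String) (i : Int) :
    (if instruction = "v" then i + 1 else i - 1) = i + pvDi instruction := by
  unfold pvDi; split <;> ring

theorem pvSeenNext (instruction : String) (i : Int) (seen : PySem.Set (Int × Int))
    (hseen : ∀ p ∈ seen, pvDi instruction * p.1 ≤ pvDi instruction * i) :
    ∀ c : Int, ((i + pvDi instruction, c) ∈ seen ↔ c ∈ (PySem.Set.empty : PySem.Set Int)) := by
  intro c
  simp only [PySem.Set.empty, List.not_mem_nil, iff_false]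
  intro hm
  have h1 := hseen _ hm
  have h2 := pvDi_sq instruction
  rw [mul_add, h2] at h1
  linarith

-- the round-by-round simulation: A's frontier loop = B's worklist loop
theorem pvLoopSim (board : List (List Int)) (instruction : String) :
    ∀ (fA : Nat) (i : Int) (F : PySem.Set Int) (s : PvS) (seen : PySem.Set (Int × Int)) (res : Option PvS),
      (∀ p ∈ seen, pvDi instruction * p.1 ≤ pvDi instruction * i) →
      pvLoopA board instruction fA i F s = some res →
      ∀ fB : Nat, (F.length + 1) * 3 ^ fA ≤ fB →
        pvLoopB board (pvDi instruction) fB (F.map (fun j => (i, j))) seen s = some res := by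
  intro fA
  induction fA with
  | zero =>
    intro i F s seen res _ hA
    simp [pvLoopA] at hA
  | succ f ih =>
    intro i F s seen res hseen hA fB hfB
    have hFlt : F.length < fB := by
      have hpow : 0 < 3 ^ (f + 1) := pow_pos (by norm_num) _
      calc F.length < F.length + 1 := Nat.lt_succ_self _
        _ ≤ (F.length + 1) * 3 ^ (f + 1) := Nat.le_mul_of_pos_right _ hpow
        _ ≤ fB := hfB
    simp only [pvLoopA] at hA
    by_cases hje : F.isEmpty
    · rw [if_pos hje] at hA
      have hF : F = [] := List.isEmpty_iff.mp hje
      subst hF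
      cases fB with
      | zero => omega
      | succ g =>
        simp only [List.map_nil, pvLoopB]
        exact hA
    · rw [if_neg hje, pvNi] at hA
      have hsl := pvSeenNext instruction i seen hseen
      rcases hrow : pvRowA board i (i + pvDi instruction) F s PySem.Set.empty with _ | ⟨s', njs'⟩ <;>
        rw [hrow] at hA
      · -- obstacle: both produce None
        obtain rfl : (none : Option PvS) = res := by injection hA
        have := (pvRowSim board (pvDi instruction) i F s PySem.Set.empty seen hsl).1 hrow fB hFlt
        simpa [PySem.Set.empty] using this
      · obtain ⟨seen', hp1, hp2, heq⟩ :=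
          (pvRowSim board (pvDi instruction) i F s PySem.Set.empty seen hsl).2 s' njs' hrow
        obtain ⟨g, rfl⟩ : ∃ g, fB = g + F.length := ⟨fB - F.length, by omega⟩
        have heq' := heq g
        simp only [PySem.Set.empty, List.map_nil, List.append_nil] at heq'
        rw [heq']
        apply ih (i + pvDi instruction) njs' s' seen' res
        · intro p hp
          have hsq := pvDi_sq instruction
          rcases hp2 p hp with h | h
          · have := hseen p h
            rw [mul_add, hsq]
            linarith
          · rw [h]
        · exact hA
        · -- fuel bookkeeping: |njs'| ≤ 2|F| and (|F|+1)·3^(f+1) ≤ g + |F|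
          have hn : njs'.length ≤ 2 * F.length := by
            have := pvRowA_len board i (i + pvDi instruction) F s PySem.Set.empty s' njs' hrow
            simpa [PySem.Set.empty] using this
          rw [pow_succ] at hfB
          generalize hPdef : (3:ℕ) ^ f = P at hfB ⊢
          have hP : 1 ≤ P := by rw [← hPdef]; exact Nat.one_le_pow _ _ (by norm_num)
          have h6 : F.length ≤ F.length * P := Nat.le_mul_of_pos_right _ hP
          calc (njs'.length + 1) * P ≤ (2 * F.length + 1) * P :=
                Nat.mul_le_mul_right P (by omega)
            _ ≤ g := by nlinarith

theorem pvMain (board : List (List Int)) (instruction : String) (i : Int) (js : List Int)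
    (hnd : js.Nodup) :
    get_new_box_locations board instruction i js = get_new_box_locations_alt board instruction i js := by
  unfold get_new_box_locations get_new_box_locations_alt
  have htot := pvLoopA_total board instruction (2 * board.length + 3) i (PySem.Set.ofList js)
      (PySem.Set.empty, PySem.Set.empty, PySem.Set.empty) (le_refl _)
  rcases hres : pvLoopA board instruction (2 * board.length + 3) i (PySem.Set.ofList js)
      (PySem.Set.empty, PySem.Set.empty, PySem.Set.empty) with _ | res
  · exact absurd hres htot
  · have hof : PySem.Set.ofList js = js := PySem.Set.ofList_eq_self_of_nodup js hnd
    have hqnd : (js.map (fun j => (i, j))).Nodup :=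
      hnd.map (fun a b h => by simpa using congrArg Prod.snd h)
    have hofq : PySem.Set.ofList (js.map (fun j => (i, j))) = js.map (fun j => (i, j)) :=
      PySem.Set.ofList_eq_self_of_nodup (js.map (fun j => (i, j))) hqnd
    have hseen : ∀ p ∈ PySem.Set.ofList (js.map (fun j => (i, j))),
        pvDi instruction * p.1 ≤ pvDi instruction * i := by
      intro p hp
      rw [hofq] at hp
      obtain ⟨j, _, rfl⟩ := List.mem_map.mp hp
      simp
    have hB := pvLoopSim board instruction (2 * board.length + 3) i js
        (PySem.Set.empty, PySem.Set.empty, PySem.Set.empty)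
        (PySem.Set.ofList (js.map (fun j => (i, j)))) res hseen (hof ▸ hres)
        ((js.length + 1) * 3 ^ (2 * board.length + 3)) (le_refl _)
    simp only [hB]
    cases res <;> rfl

-- ===== VERDICT (by name: the statement is the Claim_ definition above) =====
theorem get_new_box_locations_spec : Claim_equal_get_new_box_locations := by
  intro board instruction i js _hdom hpre
  exact pvMain board instruction i js hpre.1
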